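-- pv_equiv track=rewrite | github.com/douglas-yu/Self_Dev_Tools | PyTriage_v4.py | _usb_parse_dev_class
-- ===== SOURCE A (Python) =====
-- def _usb_parse_dev_class(dev_class: str):
--     """
--     Attempt to parse vendor/product/revision from a USBSTOR device class
--     string such as 'Disk&Ven_VENDOR&Prod_PRODUCT&Rev_1.00'.
--     """
--     vendor = ""
--     product = ""
--     revision = ""
--
--     parts = dev_class.split("&")
--     for p in parts:
--         up = p.upper()
--         if up.startswith("VEN_"):
--             vendor = p[4:]
--         elif up.startswith("PROD_"):
--             product = p[5:]
--         elif up.startswith("REV_"):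
--             revision = p[4:]
--
--     return vendor, product, revision
-- ===== SOURCE B (Python) =====
-- def _usb_parse_dev_class(dev_class: str):
--     """Index the '&'-separated key_value parts into a dict (last wins), then look up the three fields."""
--     table = {}
--     for part in dev_class.split("&"):
--         pieces = part.split("_", 1)
--         if len(pieces) == 2:
--             table[pieces[0].upper()] = pieces[1]
--     return table.get("VEN", ""), table.get("PROD", ""), table.get("REV", "")
-- ===== Notes on version B (the rewrite author's own statement) =====
-- stated objective: alternative
-- what changed: B replaces A's three conditional assignments inside the loop by a single indexing pass that splits each '&'-part at its first underscore into a dict keyed by the uppercased prefix (later duplicates overwrite), followed by a separate lookup phase d.get('VEN'/'PROD'/'REV', '').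
import Mathlib
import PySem

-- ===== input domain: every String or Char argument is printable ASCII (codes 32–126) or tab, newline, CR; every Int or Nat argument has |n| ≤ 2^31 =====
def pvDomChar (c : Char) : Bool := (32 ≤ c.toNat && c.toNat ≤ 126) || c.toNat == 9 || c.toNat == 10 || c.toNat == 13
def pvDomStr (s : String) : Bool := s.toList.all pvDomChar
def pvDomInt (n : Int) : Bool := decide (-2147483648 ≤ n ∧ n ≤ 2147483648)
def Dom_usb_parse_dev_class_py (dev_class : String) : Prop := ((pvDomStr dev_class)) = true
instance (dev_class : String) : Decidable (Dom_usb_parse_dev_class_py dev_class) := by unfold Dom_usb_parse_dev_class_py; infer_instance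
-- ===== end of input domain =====

-- B indexes the '&'-parts into a dict (split at the first '_', key uppercased, last wins) and then
-- looks the three fields up; A assigns conditionally inside the loop. Same values, different decomposition.

-- ===== PORT A =====
-- loop body of A: up = p.upper(); if up.startswith("VEN_"): vendor = p[4:]; elif … PROD_ … p[5:]; elif … REV_ … p[4:]
def pvStepA (s : List Char × List Char × List Char) (p : List Char) : List Char × List Char × List Char :=
  let up := PySem.Chars.upper p
  if PySem.Chars.startswith up ['V','E','N','_'] then (PySem.Chars.slice p (some 4) none, s.2.1, s.2.2)
  else if PySem.Chars.startswith up ['P','R','O','D','_'] then (s.1, PySem.Chars.slice p (some 5) none, s.2.2)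
  else if PySem.Chars.startswith up ['R','E','V','_'] then (s.1, s.2.1, PySem.Chars.slice p (some 4) none)
  else s

def usb_parse_dev_class_py (dev_class : String) : String × String × String :=
  let parts := PySem.Chars.splitOn dev_class.toList ['&']
  let r := parts.foldl pvStepA ([], [], [])
  (String.ofList r.1, String.ofList r.2.1, String.ofList r.2.2)

-- ===== PORT B =====
-- loop body of B: pieces = part.split("_", 1); if len(pieces) == 2: table[pieces[0].upper()] = pieces[1]
def pvStepB (d : PySem.Dict (List Char) (List Char)) (part : List Char) : PySem.Dict (List Char) (List Char) :=
  match PySem.Chars.splitOnMax part ['_'] 1 with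
  | [k, v] => d.insert (PySem.Chars.upper k) v
  | _ => d

def usb_parse_dev_class_py_alt (dev_class : String) : String × String × String :=
  let table := (PySem.Chars.splitOn dev_class.toList ['&']).foldl pvStepB PySem.Dict.empty
  (String.ofList (table.getD ['V','E','N'] []),
   String.ofList (table.getD ['P','R','O','D'] []),
   String.ofList (table.getD ['R','E','V'] []))

-- ===== PRECONDITION & SPEC =====
def Spec_usb_parse_dev_class_py (dev_class : String) (out : String × String × String) : Prop := out = usb_parse_dev_class_py_alt dev_class
instance (dev_class : String) (out : String × String × String) : Decidable (Spec_usb_parse_dev_class_py dev_class out) := by unfold Spec_usb_parse_dev_class_py; infer_instance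

-- ===== CLAIM (what is proved, stated in full; the proofs are below) =====
def Claim_equal_usb_parse_dev_class_py : Prop := ∀ (dev_class : String), Dom_usb_parse_dev_class_py dev_class → Spec_usb_parse_dev_class_py dev_class (usb_parse_dev_class_py dev_class)

-- ===== LEMMAS AND PROOFS =====

-- upperChar sends only '_' to '_'
theorem pv_upperChar_underscore {c : Char} (h : PySem.Chars.upperChar c = '_') : c = '_' := by
  unfold PySem.Chars.upperChar at h
  split at h
  · rename_i hl
    simp only [PySem.Chars.islower, Bool.and_eq_true, decide_eq_true_eq] at hl
    have h1 : 97 ≤ c.toNat := hl.1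
    have h2 : c.toNat ≤ 122 := hl.2
    have hv : (c.toNat - 32).isValidChar := Or.inl (by omega)
    have ht : (Char.ofNat (c.toNat - 32)).toNat = c.toNat - 32 := by
      rw [Char.toNat_ofNat, if_pos hv]
    rw [h] at ht
    have h95 : ('_').toNat = 95 := rfl
    omega
  · exact h

theorem pv_mem_upper_underscore {p : List Char} (h : '_' ∈ PySem.Chars.upper p) : '_' ∈ p := by
  unfold PySem.Chars.upper at h
  obtain ⟨c, hc, he⟩ := List.mem_map.mp h
  exact (pv_upperChar_underscore he) ▸ hc

-- splitOnMax.go with maxsplit exhausted returns the remainder as the final piece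
theorem pv_go0 (fuel : Nat) (l cur : List Char) (acc : List (List Char)) :
    PySem.Chars.splitOnMax.go ['_'] fuel 0 l cur acc = ((cur.reverse ++ l) :: acc).reverse := by
  cases fuel with
  | zero => simp [PySem.Chars.splitOnMax.go]
  | succ f => cases l with
    | nil => simp [PySem.Chars.splitOnMax.go]
    | cons c rest => simp [PySem.Chars.splitOnMax.go]

-- splitOnMax.go with maxsplit 1 splits at the first '_'
theorem pv_go1 (fuel : Nat) : ∀ (l cur : List Char) (acc : List (List Char)), l.length < fuel →
    PySem.Chars.splitOnMax.go ['_'] fuel 1 l cur acc =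
      (match l.dropWhile (fun c => !(c == '_')) with
       | [] => ((cur.reverse ++ l) :: acc).reverse
       | _ :: rest => (rest :: (cur.reverse ++ l.takeWhile (fun c => !(c == '_'))) :: acc).reverse) := by
  induction fuel with
  | zero => intro l cur acc h; omega
  | succ f ih =>
    intro l cur acc h
    cases l with
    | nil => simp [PySem.Chars.splitOnMax.go]
    | cons c rest =>
      by_cases hc : c = '_'
      · subst hc
        simp [PySem.Chars.splitOnMax.go, List.isPrefixOf, pv_go0, List.dropWhile]
      · have hpre : (['_'] : List Char).isPrefixOf (c :: rest) = false := by
          simp [List.isPrefixOf]; exact fun h' => hc h'.symm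
        rw [show PySem.Chars.splitOnMax.go ['_'] (f+1) 1 (c :: rest) cur acc =
            PySem.Chars.splitOnMax.go ['_'] f 1 rest (c :: cur) acc from by
          simp [PySem.Chars.splitOnMax.go, hpre]]
        have hb : (!(c == '_')) = true := by simp [hc]
        rw [ih rest (c :: cur) acc (by simpa using Nat.lt_of_succ_lt_succ h)]
        simp only [List.dropWhile_cons, List.takeWhile_cons, hb]
        cases hd : rest.dropWhile (fun c => !(c == '_')) <;> simp

-- part.split('_', 1) characterised by the first '_'
theorem pv_split1 (p : List Char) :
    PySem.Chars.splitOnMax p ['_'] 1 =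
      (match p.dropWhile (fun c => !(c == '_')) with
       | [] => [p]
       | _ :: rest => [p.takeWhile (fun c => !(c == '_')), rest]) := by
  unfold PySem.Chars.splitOnMax
  rw [if_neg (by norm_num)]
  rw [show ((1:Int).toNat) = 1 from rfl]
  rw [pv_go1 (p.length + 1) p [] [] (Nat.lt_succ_self _)]
  cases hd : p.dropWhile (fun c => !(c == '_')) <;> simp

-- 'KEY_' is a prefix of 'w_t' (w, KEY underscore-free) exactly when w = KEY
theorem pv_prefix_key_iff (key : List Char) : ∀ (w t : List Char), '_' ∉ key → '_' ∉ w →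
    (((key ++ ['_']) <+: (w ++ '_' :: t)) ↔ w = key) := by
  induction key with
  | nil =>
    intro w t _ hw
    cases w with
    | nil => simp
    | cons c w' =>
      simp only [List.nil_append, List.cons_append, List.cons_prefix_cons, List.nil_prefix,
        and_true]
      constructor
      · intro h1
        exact absurd (show ('_' : Char) ∈ c :: w' by rw [← h1]; exact List.mem_cons_self ..) hw
      · intro h; exact absurd h (by simp)
  | cons x key' ih =>
    intro w t hk hw
    have hx : x ≠ '_' := fun h => hk (by simp [h])
    cases w with
    | nil =>
      simp only [List.nil_append, List.cons_append, List.cons_prefix_cons]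
      constructor
      · rintro ⟨h1, _⟩; exact absurd h1 hx
      · intro h; simp at h
    | cons c w' =>
      simp only [List.cons_append, List.cons_prefix_cons]
      rw [ih w' t (fun h => hk (by simp [h])) (fun h => hw (by simp [h]))]
      constructor
      · rintro ⟨h1, h2⟩; rw [← h1, h2]
      · intro h; injection h with h1 h2; exact ⟨h1.symm, by rw [h2]⟩

-- p[n:] = drop n for 0 ≤ n ≤ len(p)
theorem pv_slice_drop (p : List Char) (n : Nat) (h : n ≤ p.length) :
    PySem.Chars.slice p (some (n : Int)) none = p.drop n := by
  simp [PySem.Chars.slice, PySem.List.slice, PySem.List.clampIdx]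
  rw [min_eq_left h]
  exact List.take_of_length_le (by simp)

-- the loop invariant: the dict's three entries are A's three accumulators
def pvInv (d : PySem.Dict (List Char) (List Char)) (s : List Char × List Char × List Char) : Prop :=
  d.getD ['V','E','N'] [] = s.1 ∧ d.getD ['P','R','O','D'] [] = s.2.1 ∧ d.getD ['R','E','V'] [] = s.2.2

theorem pv_step (d : PySem.Dict (List Char) (List Char)) (s : List Char × List Char × List Char)
    (p : List Char) (h : pvInv d s) : pvInv (pvStepB d p) (pvStepA s p) := by
  obtain ⟨hV, hP, hR⟩ := h
  unfold pvStepB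
  rw [pv_split1 p]
  cases hd : p.dropWhile (fun c => !(c == '_')) with
  | nil =>
    have hnp : '_' ∉ p := by
      intro hm
      have := List.dropWhile_eq_nil_iff.mp hd '_' hm
      simp at this
    have hup : '_' ∉ PySem.Chars.upper p := fun hm => hnp (pv_mem_upper_underscore hm)
    have hsw : ∀ (q : List Char), '_' ∈ q → ¬ (PySem.Chars.startswith (PySem.Chars.upper p) q = true) := by
      intro q hq hs
      rw [PySem.Chars.startswith_iff] at hs
      exact hup (hs.subset hq)
    unfold pvStepA
    rw [if_neg (hsw _ (by decide)), if_neg (hsw _ (by decide)), if_neg (hsw _ (by decide))]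
    exact ⟨hV, hP, hR⟩
  | cons c rest =>
    have hc : c = '_' := by
      have h2 := List.dropWhile_get_zero_not (fun c => !(c == '_')) p (by rw [hd]; simp)
      simp [hd] at h2
      exact h2
    subst hc
    have hp : p = p.takeWhile (fun c => !(c == '_')) ++ '_' :: rest := by
      conv_lhs => rw [← List.takeWhile_append_dropWhile (p := fun c => !(c == '_')) (l := p)]
      rw [hd]
    have hk : '_' ∉ p.takeWhile (fun c => !(c == '_')) := by
      intro hm
      have := List.mem_takeWhile_imp hm
      simp at this
    have hku : '_' ∉ PySem.Chars.upper (p.takeWhile (fun c => !(c == '_'))) :=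
      fun hm => hk (pv_mem_upper_underscore hm)
    have hupp : PySem.Chars.upper p =
        PySem.Chars.upper (p.takeWhile (fun c => !(c == '_'))) ++ '_' :: PySem.Chars.upper rest := by
      conv_lhs => rw [hp]
      simp [PySem.Chars.upper]
      rfl
    have htest : ∀ key : List Char, '_' ∉ key →
        (PySem.Chars.startswith (PySem.Chars.upper p) (key ++ ['_']) = true ↔
          PySem.Chars.upper (p.takeWhile (fun c => !(c == '_'))) = key) := by
      intro key hkey
      rw [PySem.Chars.startswith_iff, hupp,
        pv_prefix_key_iff key (PySem.Chars.upper (p.takeWhile (fun c => !(c == '_'))))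
          (PySem.Chars.upper rest) hkey hku]
    have hlen : p.length = (p.takeWhile (fun c => !(c == '_'))).length + 1 + rest.length := by
      have := congrArg List.length hp
      simp at this
      omega
    have hdrop : p.drop ((p.takeWhile (fun c => !(c == '_'))).length + 1) = rest := by
      have e : (p.takeWhile (fun c => !(c == '_')) ++ ['_']) ++ rest = p := by
        conv_rhs => rw [hp]
        simp
      have hstab : List.takeWhile (fun c => !(c == '_'))
          (List.takeWhile (fun c => !(c == '_')) p ++ '_' :: rest)
          = List.takeWhile (fun c => !(c == '_')) p := by
        conv_lhs => rw [← hp]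
      rw [← e, List.drop_left' (by simp [hstab])]
    have hulen : ∀ key : List Char, PySem.Chars.upper (p.takeWhile (fun c => !(c == '_'))) = key →
        (p.takeWhile (fun c => !(c == '_'))).length = key.length := by
      intro key hkey
      have := congrArg List.length hkey
      simpa [PySem.Chars.upper] using this
    have hslice : ∀ m : Nat, (p.takeWhile (fun c => !(c == '_'))).length + 1 = m →
        PySem.Chars.slice p (some (m : Int)) none = rest := by
      intro m hm
      rw [pv_slice_drop p m (by omega), ← hm, hdrop]
    unfold pvStepA
    by_cases h1 : PySem.Chars.upper (p.takeWhile (fun c => !(c == '_'))) = ['V','E','N']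
    · have ht1 : PySem.Chars.startswith (PySem.Chars.upper p) ['V','E','N','_'] = true := by
        rw [show (['V','E','N','_'] : List Char) = ['V','E','N'] ++ ['_'] from rfl]
        exact (htest _ (by decide)).mpr h1
      simp only [ht1, if_true]
      rw [h1]
      refine ⟨?_, ?_, ?_⟩
      · rw [PySem.Dict.getD_insert_self]
        have := hslice 4 (by have := hulen _ h1; simp at this; omega)
        simpa using this.symm
      · rw [PySem.Dict.getD_insert_of_ne _ _ _ (by decide)]
        exact hP
      · rw [PySem.Dict.getD_insert_of_ne _ _ _ (by decide)]
        exact hR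
    · have ht1 : ¬ (PySem.Chars.startswith (PySem.Chars.upper p) ['V','E','N','_'] = true) := by
        rw [show (['V','E','N','_'] : List Char) = ['V','E','N'] ++ ['_'] from rfl]
        exact fun ht => h1 ((htest _ (by decide)).mp ht)
      by_cases h2 : PySem.Chars.upper (p.takeWhile (fun c => !(c == '_'))) = ['P','R','O','D']
      · have ht2 : PySem.Chars.startswith (PySem.Chars.upper p) ['P','R','O','D','_'] = true := by
          rw [show (['P','R','O','D','_'] : List Char) = ['P','R','O','D'] ++ ['_'] from rfl]
          exact (htest _ (by decide)).mpr h2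
        simp only [ht1, ht2, if_true]
        rw [h2]
        refine ⟨?_, ?_, ?_⟩
        · rw [PySem.Dict.getD_insert_of_ne _ _ _ (by decide)]
          exact hV
        · rw [PySem.Dict.getD_insert_self]
          have := hslice 5 (by have := hulen _ h2; simp at this; omega)
          simpa using this.symm
        · rw [PySem.Dict.getD_insert_of_ne _ _ _ (by decide)]
          exact hR
      · have ht2 : ¬ (PySem.Chars.startswith (PySem.Chars.upper p) ['P','R','O','D','_'] = true) := by
          rw [show (['P','R','O','D','_'] : List Char) = ['P','R','O','D'] ++ ['_'] from rfl]
          exact fun ht => h2 ((htest _ (by decide)).mp ht)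
        by_cases h3 : PySem.Chars.upper (p.takeWhile (fun c => !(c == '_'))) = ['R','E','V']
        · have ht3 : PySem.Chars.startswith (PySem.Chars.upper p) ['R','E','V','_'] = true := by
            rw [show (['R','E','V','_'] : List Char) = ['R','E','V'] ++ ['_'] from rfl]
            exact (htest _ (by decide)).mpr h3
          simp only [ht1, ht2, ht3, if_true]
          rw [h3]
          refine ⟨?_, ?_, ?_⟩
          · rw [PySem.Dict.getD_insert_of_ne _ _ _ (by decide)]
            exact hV
          · rw [PySem.Dict.getD_insert_of_ne _ _ _ (by decide)]
            exact hP
          · rw [PySem.Dict.getD_insert_self]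
            have := hslice 4 (by have := hulen _ h3; simp at this; omega)
            simpa using this.symm
        · have ht3 : ¬ (PySem.Chars.startswith (PySem.Chars.upper p) ['R','E','V','_'] = true) := by
            rw [show (['R','E','V','_'] : List Char) = ['R','E','V'] ++ ['_'] from rfl]
            exact fun ht => h3 ((htest _ (by decide)).mp ht)
          simp only [ht1, ht2, ht3]
          refine ⟨?_, ?_, ?_⟩
          · rw [PySem.Dict.getD_insert_of_ne _ _ _ (fun h => h1 h.symm)]
            exact hV
          · rw [PySem.Dict.getD_insert_of_ne _ _ _ (fun h => h2 h.symm)]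
            exact hP
          · rw [PySem.Dict.getD_insert_of_ne _ _ _ (fun h => h3 h.symm)]
            exact hR

theorem pv_fold (parts : List (List Char)) : ∀ d s, pvInv d s →
    pvInv (parts.foldl pvStepB d) (parts.foldl pvStepA s) := by
  intro d s h
  induction parts generalizing d s with
  | nil => exact h
  | cons p t ih => exact ih _ _ (pv_step d s p h)

-- ===== VERDICT (by name: the statement is the Claim_ definition above) =====
theorem usb_parse_dev_class_py_spec : Claim_equal_usb_parse_dev_class_py := by
  intro dev_class _
  unfold Spec_usb_parse_dev_class_py usb_parse_dev_class_py usb_parse_dev_class_py_alt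
  have h := pv_fold (PySem.Chars.splitOn dev_class.toList ['&']) PySem.Dict.empty ([], [], [])
    ⟨rfl, rfl, rfl⟩
  obtain ⟨h1, h2, h3⟩ := h
  simp only [h1, h2, h3]
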